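-- pv_equiv track=rewrite | github.com/ruijorgenobre/deepMirCut | graph_classificationDV_boxPlot.py | get_max_dvs
-- ===== SOURCE A (Python) =====
-- def get_max_dvs(data):
--     max_dvs = {}
--     max_positions = {}
--     for id in list(data):
--         max_dvs[id] = {}
--         max_positions[id] = {}
--         for c in list(data[id]):
--             if c != 'O':
--                 max_positions[id][c] = data[id][c].index(max(data[id][c]))
--                 max_dvs[id][c] = data[id][c][max_positions[id][c]]
--     return max_dvs, max_positions
-- ===== SOURCE B (Python) =====
-- def get_max_dvs(data):
--     def best(xs):
--         bv = xs[0]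
--         bi = 0
--         for i in range(1, len(xs)):
--             if bv < xs[i]:
--                 bv = xs[i]
--                 bi = i
--         return bv, bi
--     pairs = {id: {c: best(xs) for c, xs in inner.items() if c != 'O'}
--              for id, inner in data.items()}
--     return ({id: {c: p[0] for c, p in row.items()} for id, row in pairs.items()},
--             {id: {c: p[1] for c, p in row.items()} for id, row in pairs.items()})
-- ===== Notes on version B (the rewrite author's own statement) =====
-- stated objective: alternative
-- what changed: Replaces per-list max() followed by .index() and a re-index (three passes) with a single scan keeping (best value, best index), updating only on strictly greater values so the first maximum wins, and builds both result dicts by comprehensions over one shared pass instead of mutating nested dicts in place.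
import Mathlib
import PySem

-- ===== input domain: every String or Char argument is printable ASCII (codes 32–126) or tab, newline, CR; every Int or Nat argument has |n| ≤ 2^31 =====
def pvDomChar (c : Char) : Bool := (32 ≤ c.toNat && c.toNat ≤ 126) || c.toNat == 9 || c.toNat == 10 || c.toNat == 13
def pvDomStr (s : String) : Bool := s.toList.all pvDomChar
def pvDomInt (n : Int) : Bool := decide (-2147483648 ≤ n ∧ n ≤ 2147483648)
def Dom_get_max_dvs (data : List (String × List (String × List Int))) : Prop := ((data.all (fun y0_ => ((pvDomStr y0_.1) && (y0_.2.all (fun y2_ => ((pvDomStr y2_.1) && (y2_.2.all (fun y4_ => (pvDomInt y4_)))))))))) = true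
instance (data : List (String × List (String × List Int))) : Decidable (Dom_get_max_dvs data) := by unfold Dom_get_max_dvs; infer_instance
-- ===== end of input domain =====

-- B replaces A's max()+.index()+re-index (three list passes) by one scan per list keeping
-- (best value, best index), and builds both result dicts by comprehensions (alternative, not faster).
-- Both programs read the argument as a Python dict: the association lists go through
-- PySem.Dict.ofList (last value per key wins, first-occurrence position), as Python builds the dict.

-- ===== PORT A =====
def get_max_dvs (data : List (String × List (String × List Int))) : (List (String × List (String × Int))) × (List (String × List (String × Int))) :=
  (PySem.Dict.ofList data).items.foldl (fun acc p =>
    let inner := (PySem.Dict.ofList p.2).items.foldl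
      (fun (q : List (String × Int) × List (String × Int)) cp =>
        if cp.1 ≠ "O" then
          -- max_positions[id][c] = data[id][c].index(max(data[id][c]))
          let m := (PySem.List.max? cp.2 (fun y => y)).getD 0
          let pos := (PySem.List.index? cp.2 m).getD 0
          -- max_dvs[id][c] = data[id][c][max_positions[id][c]]
          let v := (PySem.List.pyGet? cp.2 (pos : Int)).getD 0
          (q.1 ++ [(cp.1, v)], q.2 ++ [(cp.1, (pos : Int))])
        else q) ([], [])
    (acc.1 ++ [(p.1, inner.1)], acc.2 ++ [(p.1, inner.2)])) ([], [])

-- ===== PORT B =====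
-- bv = xs[0]; bi = 0; for i in range(1, len(xs)): if bv < xs[i]: bv, bi = xs[i], i
def pvBest (xs : List Int) : Int × Int :=
  let bv := (PySem.List.pyGet? xs 0).getD 0
  (PySem.List.pyRange 1 xs.length 1).foldl
    (fun b i => let v := PySem.List.pyGetD xs i 0
                if b.1 < v then (v, i) else b) (bv, 0)

def get_max_dvs_alt (data : List (String × List (String × List Int))) : (List (String × List (String × Int))) × (List (String × List (String × Int))) :=
  let pairs := (PySem.Dict.ofList data).items.map (fun p =>
    (p.1, (PySem.Dict.ofList p.2).items.filterMap
      (fun cp => if cp.1 ≠ "O" then some (cp.1, pvBest cp.2) else none)))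
  (pairs.map (fun r => (r.1, r.2.map (fun cq => (cq.1, cq.2.1)))),
   pairs.map (fun r => (r.1, r.2.map (fun cq => (cq.1, cq.2.2)))))

-- ===== PRECONDITION & SPEC =====
-- Pre_ excludes exactly the inputs where some inner dict maps a key other than "O" to an
-- empty list: there A raises ValueError (max() of an empty sequence) and returns nothing.
def Pre_get_max_dvs (data : List (String × List (String × List Int))) : Prop :=
  ∀ p ∈ (PySem.Dict.ofList data).items, ∀ q ∈ (PySem.Dict.ofList p.2).items, q.1 ≠ "O" → q.2 ≠ []
instance (data : List (String × List (String × List Int))) : Decidable (Pre_get_max_dvs data) := by unfold Pre_get_max_dvs; infer_instance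

def pvWitness_get_max_dvs : (List (String × List (String × List Int))) :=
  [("id1", [("x", [1, 3, 3]), ("O", []), ("y", [-2])]), ("id2", [])]

def Spec_get_max_dvs (data : List (String × List (String × List Int))) (out : (List (String × List (String × Int))) × (List (String × List (String × Int)))) : Prop := out = get_max_dvs_alt data
instance (data : List (String × List (String × List Int))) (out : (List (String × List (String × Int))) × (List (String × List (String × Int)))) : Decidable (Spec_get_max_dvs data out) := by unfold Spec_get_max_dvs; infer_instance

-- ===== CLAIM (what is proved, stated in full; the proofs are below) =====
def Claim_equal_get_max_dvs : Prop := ∀ (data : List (String × List (String × List Int))), Dom_get_max_dvs data → Pre_get_max_dvs data → Spec_get_max_dvs data (get_max_dvs data)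

-- ===== LEMMAS AND PROOFS =====

-- B's index loop as a structural scan over the remaining suffix
def pvAux : List Int → Int → Int × Int → Int × Int
  | [], _, b => b
  | v :: t, i, b => pvAux t (i + 1) (if b.1 < v then (v, i) else b)

theorem pvAux_spec (t : List Int) : ∀ (i bv bi : Int),
    pvAux t i (bv, bi) =
      if t.foldl max bv ≤ bv then (bv, bi)
      else (t.foldl max bv, i + (t.idxOf (t.foldl max bv) : Int)) := by
  induction t with
  | nil => intro i bv bi; simp [pvAux]
  | cons v t ih =>
    intro i bv bi
    have hle : ∀ (a : Int) (l : List Int), a ≤ l.foldl max a := by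
      intro a l
      induction l generalizing a with
      | nil => simp
      | cons w l ihl => simp only [List.foldl_cons]; exact le_trans (le_max_left a w) (ihl _)
    have hmono : ∀ (a b : Int) (l : List Int), a ≤ b → l.foldl max a ≤ l.foldl max b := by
      intro a b l
      induction l generalizing a b with
      | nil => simp
      | cons w l ihl => intro h; simp only [List.foldl_cons]; exact ihl _ _ (by omega)
    simp only [pvAux, List.foldl_cons]
    by_cases h : bv < v
    · rw [if_pos h, ih]
      have hmax : max bv v = v := by omega
      rw [hmax]
      have hge : v ≤ t.foldl max v := hle v t
      by_cases h2 : t.foldl max v ≤ v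
      · have hvv : t.foldl max v = v := le_antisymm h2 hge
        rw [if_pos h2, hvv, if_neg (by omega), List.idxOf_cons_self]
        simp
      · rw [if_neg h2, if_neg (by omega)]
        have hne : v ≠ t.foldl max v := by omega
        rw [List.idxOf_cons_ne _ hne]
        push_cast; ring_nf
    · rw [if_neg h, ih]
      have hmax : max bv v = bv := by omega
      rw [hmax]
      by_cases h2 : t.foldl max bv ≤ bv
      · rw [if_pos h2, if_pos h2]
      · rw [if_neg h2, if_neg h2]
        have hvne : v ≠ t.foldl max bv := by omega
        rw [List.idxOf_cons_ne _ hvne]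
        push_cast; ring_nf

theorem pvF (xs : List Int) : ∀ (m k : Nat) (b : Int × Int), xs.length - k = m →
    (PySem.List.pyRange (k : Int) (xs.length : Int) 1).foldl
      (fun b i => if b.1 < PySem.List.pyGetD xs i 0 then (PySem.List.pyGetD xs i 0, i) else b) b
    = pvAux (xs.drop k) (k : Int) b := by
  intro m
  induction m with
  | zero =>
    intro k b hk
    have h1 : (xs.length : Int) ≤ (k : Int) := by exact_mod_cast Nat.le_of_sub_eq_zero hk
    rw [PySem.List.pyRange_one_eq_nil h1, List.drop_eq_nil_of_le (by omega)]
    simp [pvAux]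
  | succ m ih =>
    intro k b hk
    have hklt : k < xs.length := by omega
    rw [PySem.List.pyRange_one_cons (by exact_mod_cast hklt)]
    rw [List.drop_eq_getElem_cons hklt]
    simp only [List.foldl_cons, pvAux]
    have hget : PySem.List.pyGetD xs (k : Int) 0 = xs[k] := by
      rw [PySem.List.pyGetD_natCast]; exact List.getD_eq_getElem _ _ hklt
    have hcast : ((k : Int) + 1) = ((k + 1 : Nat) : Int) := by push_cast; ring
    rw [hget, hcast, ih (k + 1) _ (by omega)]

theorem pvBest_char (x : Int) (t : List Int) :
    pvBest (x :: t) = (t.foldl max x, (((x :: t).idxOf (t.foldl max x) : Nat) : Int)) := by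
  have hle : x ≤ t.foldl max x := by
    have : ∀ (a : Int) (l : List Int), a ≤ l.foldl max a := by
      intro a l
      induction l generalizing a with
      | nil => simp
      | cons w l ihl => simp only [List.foldl_cons]; exact le_trans (le_max_left a w) (ihl _)
    exact this x t
  unfold pvBest
  simp only [PySem.List.pyGet?_zero_cons, Option.getD_some]
  have h2 := pvF (x :: t) ((x :: t).length - 1) 1 (x, 0) rfl
  simp only [Nat.cast_one, List.drop_one, List.tail_cons] at h2
  rw [h2]
  rw [pvAux_spec]
  by_cases h3 : t.foldl max x ≤ x
  · have hvv : t.foldl max x = x := le_antisymm h3 hle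
    rw [if_pos h3, hvv, List.idxOf_cons_self]
    simp
  · rw [if_neg h3]
    have hne : x ≠ t.foldl max x := by omega
    rw [List.idxOf_cons_ne _ hne]
    push_cast; ring_nf

theorem pvPairFoldl {α β γ : Type} (P : α → Prop) [DecidablePred P] (g1 : α → β) (g2 : α → γ)
    (L : List α) : ∀ (a1 : List β) (a2 : List γ),
    L.foldl (fun q x => if P x then (q.1 ++ [g1 x], q.2 ++ [g2 x]) else q) (a1, a2)
    = (a1 ++ (L.filter (fun x => decide (P x))).map g1,
       a2 ++ (L.filter (fun x => decide (P x))).map g2) := by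
  induction L with
  | nil => intro a1 a2; simp
  | cons x L ih =>
    intro a1 a2
    by_cases h : P x
    · simp [h, ih]
    · simp [h, ih]

theorem pvPairFoldlMap {α β γ : Type} (g1 : α → β) (g2 : α → γ)
    (L : List α) : ∀ (a1 : List β) (a2 : List γ),
    L.foldl (fun q x => (q.1 ++ [g1 x], q.2 ++ [g2 x])) (a1, a2)
    = (a1 ++ L.map g1, a2 ++ L.map g2) := by
  induction L with
  | nil => intro a1 a2; simp
  | cons x L ih => intro a1 a2; simp [ih]

theorem pvFilterMapIf {α β : Type} (P : α → Prop) [DecidablePred P] (g : α → β)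
    (L : List α) :
    L.filterMap (fun x => if P x then some (g x) else none)
    = (L.filter (fun x => decide (P x))).map g := by
  induction L with
  | nil => simp
  | cons x L ih =>
    by_cases h : P x
    · simp [h, ih]
    · simp [h, ih]

theorem pvIdxOf? (l : List Int) (a : Int) (h : a ∈ l) : l.idxOf? a = some (l.idxOf a) := by
  have hs : (l.idxOf? a).isSome := by simpa [List.isSome_idxOf?] using h
  obtain ⟨i, hi⟩ := Option.isSome_iff_exists.mp hs
  rw [hi, List.idxOf_eq_getD_idxOf?, hi, Option.getD_some]

-- A's three passes compute exactly B's single-scan pair on a nonempty list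
theorem pvTriple (xs : List Int) (h : xs ≠ []) :
    ((PySem.List.pyGet? xs (((PySem.List.index? xs ((PySem.List.max? xs (fun y => y)).getD 0)).getD 0 : Nat) : Int)).getD 0,
     (((PySem.List.index? xs ((PySem.List.max? xs (fun y => y)).getD 0)).getD 0 : Nat) : Int))
    = pvBest xs := by
  obtain ⟨x, t, rfl⟩ : ∃ x t, xs = x :: t := by
    cases xs with
    | nil => exact absurd rfl h
    | cons a b => exact ⟨a, b, rfl⟩
  have hmax : PySem.List.max? (x :: t) (fun y => y) = some (t.foldl max x) :=
    PySem.List.max?_id_cons x t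
  have hmem : t.foldl max x ∈ x :: t := PySem.List.max?_mem hmax
  rw [pvBest_char, hmax]
  simp only [Option.getD_some, PySem.List.index?_eq_idxOf?]
  rw [pvIdxOf? _ _ hmem]
  simp only [Option.getD_some]
  have hlt : (x :: t).idxOf (t.foldl max x) < (x :: t).length :=
    List.idxOf_lt_length_of_mem hmem
  rw [PySem.List.pyGet?_natCast, List.getElem?_eq_getElem hlt]
  simp only [Option.getD_some]
  rw [List.getElem_idxOf hlt]

-- ===== VERDICT (by name: the statement is the Claim_ definition above) =====
theorem get_max_dvs_spec : Claim_equal_get_max_dvs := by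
  intro data _ hpre
  unfold Spec_get_max_dvs get_max_dvs get_max_dvs_alt
  rw [pvPairFoldlMap]
  simp only [List.nil_append, List.map_map, pvFilterMapIf]
  refine congrArg₂ Prod.mk ?_ ?_ <;>
  · refine List.map_congr_left ?_
    intro p hp
    rw [pvPairFoldl]
    simp only [List.nil_append, Function.comp_apply]
    refine congrArg (Prod.mk p.1) ?_
    rw [List.map_map]
    refine List.map_congr_left ?_
    intro cp hcp
    have hmemf := List.mem_filter.mp hcp
    have hne : cp.1 ≠ "O" := by simpa using hmemf.2
    have hnil : cp.2 ≠ [] := hpre p hp cp hmemf.1 hne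
    simp only [Function.comp_apply]
    rw [← pvTriple cp.2 hnil]
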